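-- pv_equiv track=rewrite | github.com/v0jt4s13/python-test | telewizja.py | strategia_a
-- ===== SOURCE A (Python) =====
-- def strategia_a(movie_list: list) -> dict:
--     longest = movie_list[0]
--
--     for movie in movie_list:
--         if longest['duration'] < movie['duration']:
--             longest = movie
--         elif (longest['duration'] == movie['duration']
--               and longest['end'] > movie['end']):
--             longest = movie
--     return longest
-- ===== SOURCE B (Python) =====
-- def strategia_a(movie_list: list) -> dict:
--     return sorted(movie_list, key=lambda m: (-m['duration'], m['end']))[0]
-- ===== Notes on version B (the rewrite author's own statement) =====
-- stated objective: alternative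
-- what changed: Replaces the hand-written replace-when-strictly-better scan with sort-then-pick: sort the whole list by the lexicographic key (-duration, end) and take the first element; stability of Python's sort reproduces A's earliest-winner tie rule.
import Mathlib
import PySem

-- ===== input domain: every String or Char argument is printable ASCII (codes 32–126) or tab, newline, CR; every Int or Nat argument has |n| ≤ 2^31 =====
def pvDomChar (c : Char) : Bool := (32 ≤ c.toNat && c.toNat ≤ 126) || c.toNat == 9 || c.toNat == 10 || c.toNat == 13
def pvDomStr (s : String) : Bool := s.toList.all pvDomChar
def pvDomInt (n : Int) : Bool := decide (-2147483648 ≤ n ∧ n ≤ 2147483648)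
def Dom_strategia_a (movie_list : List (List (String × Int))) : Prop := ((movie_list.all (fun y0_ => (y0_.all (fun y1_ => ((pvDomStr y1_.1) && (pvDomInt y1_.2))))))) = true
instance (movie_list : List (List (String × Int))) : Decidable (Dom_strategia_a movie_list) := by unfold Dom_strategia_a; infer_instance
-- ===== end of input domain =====

-- B replaces A's replace-when-strictly-better scan with sort-then-pick: stably sort the whole
-- list by the lexicographic key (-duration, end) and return the first element (objective:
-- alternative). Equivalence is proved on Pre_ (nonempty list, every movie carrying both keys);
-- outside Pre_ both Pythons raise.

-- m['duration'] on the association-list dict; Pre_ guarantees the key is present, so the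
-- default 0 of getD is never consulted on admitted inputs (Python would raise KeyError there).
def pvLook (m : List (String × Int)) (k : String) : Int := (PySem.Dict.mk m).getD k 0

-- ===== PORT A =====
def strategia_a (movie_list : List (List (String × Int))) : List (String × Int) :=
  match movie_list with
  | [] => []  -- movie_list[0] raises IndexError; excluded by Pre_
  | l0 :: _ =>
    movie_list.foldl
      (fun longest movie =>
        if pvLook longest "duration" < pvLook movie "duration" then movie
        else if pvLook longest "duration" = pvLook movie "duration"
                ∧ pvLook longest "end" > pvLook movie "end" then movie
        else longest)
      l0

-- ===== PORT B =====
def strategia_a_alt (movie_list : List (List (String × Int))) : List (String × Int) :=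
  (PySem.List.sorted2 movie_list
      (fun m => -(pvLook m "duration"))
      (fun m => pvLook m "end")).headD []   -- sorted(...)[0] raises IndexError on []; excluded by Pre_

-- ===== PRECONDITION & SPEC =====
-- Pre_ excludes the raising inputs: the empty list (IndexError in both A and B) and movies
-- missing a 'duration' or 'end' key; B's sort key always reads both keys and raises KeyError
-- there, while A's lazy elif reads 'end' only on duration ties, an accident of branch order
-- no caller should rely on.
def Pre_strategia_a (movie_list : List (List (String × Int))) : Prop :=
  movie_list ≠ [] ∧ ∀ m ∈ movie_list,
    (PySem.Dict.mk m).contains "duration" = true ∧ (PySem.Dict.mk m).contains "end" = true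
instance (movie_list : List (List (String × Int))) : Decidable (Pre_strategia_a movie_list) := by
  unfold Pre_strategia_a; infer_instance

def pvWitness_strategia_a : (List (List (String × Int))) :=
  [[("duration", 90), ("end", 2100)], [("duration", 120), ("end", 2000)]]

def Spec_strategia_a (movie_list : List (List (String × Int))) (out : List (String × Int)) : Prop := out = strategia_a_alt movie_list
instance (movie_list : List (List (String × Int))) (out : List (String × Int)) : Decidable (Spec_strategia_a movie_list out) := by unfold Spec_strategia_a; infer_instance

-- ===== CLAIM (what is proved, stated in full; the proofs are below) =====
def Claim_equal_strategia_a : Prop := ∀ (movie_list : List (List (String × Int))), Dom_strategia_a movie_list → Pre_strategia_a movie_list → Spec_strategia_a movie_list (strategia_a movie_list)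

-- ===== LEMMAS AND PROOFS =====

-- Head of an insertion-sort fold: inserting x into a nonempty accumulator keeps as head
-- whichever of x and the old head comes first, so the final head is the running first-minimum.
theorem pv_insert_head {α : Type} (before : α → α → Bool) :
    ∀ (t : List α) (h : α) (rest : List α), ∃ rest',
      t.foldl (fun acc x => PySem.List.insertBy before x acc) (h :: rest)
        = (t.foldl (fun m x => if before x m then x else m) h) :: rest' := by
  intro t
  induction t with
  | nil => intro h rest; exact ⟨rest, rfl⟩
  | cons x t ih =>
    intro h rest
    rw [List.foldl_cons, List.foldl_cons]
    have hins : PySem.List.insertBy before x (h :: rest)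
        = if before x h then x :: h :: rest else h :: PySem.List.insertBy before x rest := rfl
    by_cases hb : before x h
    · rw [hins, if_pos hb, if_pos hb]; exact ih x (h :: rest)
    · rw [hins, if_neg hb, if_neg hb]; exact ih h _

-- The first-minimum step under the lexicographic key (-duration, end) IS A's loop body.
theorem pv_step_eq :
    (fun (m x : List (String × Int)) =>
      if (decide (-(pvLook x "duration") < -(pvLook m "duration")) ||
          !decide (-(pvLook m "duration") < -(pvLook x "duration")) &&
          decide (pvLook x "end" < pvLook m "end")) then x else m)
    = (fun (longest movie : List (String × Int)) =>
        if pvLook longest "duration" < pvLook movie "duration" then movie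
        else if pvLook longest "duration" = pvLook movie "duration"
                ∧ pvLook longest "end" > pvLook movie "end" then movie
        else longest) := by
  funext m x
  split_ifs <;> first
    | rfl
    | (exfalso
       simp only [Bool.or_eq_true, Bool.and_eq_true, Bool.not_eq_true', decide_eq_true_eq,
         decide_eq_false_iff_not, gt_iff_lt, not_and, not_lt, not_or] at *
       omega)

-- A's first iteration compares the head with itself and keeps it.
theorem pv_self_step (m : List (String × Int)) :
    (if pvLook m "duration" < pvLook m "duration" then m
     else if pvLook m "duration" = pvLook m "duration"
             ∧ pvLook m "end" > pvLook m "end" then m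
     else m) = m := by
  simp

-- ===== VERDICT (by name: the statement is the Claim_ definition above) =====
theorem strategia_a_spec : Claim_equal_strategia_a := by
  intro ml _ hpre
  unfold Spec_strategia_a
  obtain ⟨hne, -⟩ := hpre
  match ml with
  | [] => exact absurd rfl hne
  | l0 :: t =>
    have hA : strategia_a (l0 :: t)
        = t.foldl
            (fun longest movie =>
              if pvLook longest "duration" < pvLook movie "duration" then movie
              else if pvLook longest "duration" = pvLook movie "duration"
                      ∧ pvLook longest "end" > pvLook movie "end" then movie
              else longest)
            l0 := by
      show (l0 :: t).foldl _ l0 = _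
      rw [List.foldl_cons, pv_self_step]
    obtain ⟨rest', hr⟩ := pv_insert_head
      (fun a b => decide (-(pvLook a "duration") < -(pvLook b "duration")) ||
        !decide (-(pvLook b "duration") < -(pvLook a "duration")) &&
        decide (pvLook a "end" < pvLook b "end")) t l0 []
    show strategia_a (l0 :: t) = strategia_a_alt (l0 :: t)
    unfold strategia_a_alt PySem.List.sorted2
    show strategia_a (l0 :: t) =
      (t.foldl (fun acc x => PySem.List.insertBy
          (fun a b => decide (-(pvLook a "duration") < -(pvLook b "duration")) ||
            !decide (-(pvLook b "duration") < -(pvLook a "duration")) &&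
            decide (pvLook a "end" < pvLook b "end")) x acc) [l0]).headD []
    rw [hr]
    show strategia_a (l0 :: t) =
      t.foldl (fun m x =>
        if (decide (-(pvLook x "duration") < -(pvLook m "duration")) ||
            !decide (-(pvLook m "duration") < -(pvLook x "duration")) &&
            decide (pvLook x "end" < pvLook m "end")) then x else m) l0
    rw [hA, ← pv_step_eq]
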